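-- pv_equiv track=rewrite | github.com/BumsCross1/MultiTool | MultiTool.py | risk_assessment
-- ===== SOURCE A (Python) =====
-- def risk_assessment(vulnerabilities):
--     """Assess risks of vulnerabilities"""
--     return {
--         'critical': sum(1 for vulns in vulnerabilities.values()
--                        if any(v['severity'] == 'critical' for v in vulns)),
--         'high': sum(1 for vulns in vulnerabilities.values()
--                    if any(v['severity'] == 'high' for v in vulns)),
--         'medium': sum(1 for vulns in vulnerabilities.values()
--                      if any(v['severity'] == 'medium' for v in vulns)),
--         'low': sum(1 for vulns in vulnerabilities.values()
--                   if any(v['severity'] == 'low' for v in vulns))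
--     }
-- ===== SOURCE B (Python) =====
-- def risk_assessment(vulnerabilities):
--     """Assess risks of vulnerabilities"""
--     counts = {'critical': 0, 'high': 0, 'medium': 0, 'low': 0}
--     for vulns in vulnerabilities.values():
--         seen = {v['severity'] for v in vulns}
--         for s in counts:
--             if s in seen:
--                 counts[s] += 1
--     return counts
-- ===== Notes on version B (the rewrite author's own statement) =====
-- stated objective: alternative
-- what changed: A makes four independent passes over the whole dict, one any()-scan per severity level; B makes a single pass, building each host's set of severities once and bumping the four counters from it.
import Mathlib
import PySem

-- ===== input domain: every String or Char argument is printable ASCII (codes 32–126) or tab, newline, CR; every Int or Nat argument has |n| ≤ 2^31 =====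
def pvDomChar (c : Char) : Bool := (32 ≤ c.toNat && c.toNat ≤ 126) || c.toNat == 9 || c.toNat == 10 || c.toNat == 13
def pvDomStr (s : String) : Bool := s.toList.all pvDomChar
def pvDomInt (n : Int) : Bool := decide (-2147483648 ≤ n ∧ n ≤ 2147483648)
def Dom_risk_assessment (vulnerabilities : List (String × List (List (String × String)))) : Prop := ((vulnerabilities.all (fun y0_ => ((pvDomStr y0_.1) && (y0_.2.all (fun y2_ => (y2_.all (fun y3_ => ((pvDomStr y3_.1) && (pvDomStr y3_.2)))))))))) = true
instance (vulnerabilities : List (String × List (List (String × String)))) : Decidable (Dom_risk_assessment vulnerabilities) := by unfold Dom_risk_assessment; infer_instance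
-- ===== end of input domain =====

-- B replaces A's four independent any()-passes over the dict by ONE pass that builds each
-- host's set of severities once and bumps the four counters from it (alternative decomposition).

-- ===== PORT A =====
-- one 'sum(1 for vulns in vulnerabilities.values() if any(v['severity'] == s for v in vulns))'
-- (v['severity'] is total under Pre_: the key is present, so get? = some _)
def pvCountA (vulnerabilities : List (String × List (List (String × String)))) (s : String) : Int :=
  (vulnerabilities.map Prod.snd).foldl
    (fun acc vulns =>
      if vulns.any (fun v => PySem.Dict.get? ⟨v⟩ "severity" == some s) then acc + 1 else acc) 0

def risk_assessment (vulnerabilities : List (String × List (List (String × String)))) : List (String × Int) :=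
  [("critical", pvCountA vulnerabilities "critical"),
   ("high", pvCountA vulnerabilities "high"),
   ("medium", pvCountA vulnerabilities "medium"),
   ("low", pvCountA vulnerabilities "low")]

-- ===== PORT B =====
-- seen = {v['severity'] for v in vulns}   (getD total form; exact under Pre_: the key is present)
def pvHostSeen (vulns : List (List (String × String))) : PySem.Set String :=
  PySem.Set.ofList (vulns.map (fun v => PySem.Dict.getD ⟨v⟩ "severity" ""))

def risk_assessment_alt (vulnerabilities : List (String × List (List (String × String)))) : List (String × Int) :=
  let t :=
    vulnerabilities.foldl
      (fun (c : Int × Int × Int × Int) kv =>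
        let seen := pvHostSeen kv.2
        (c.1 + (if seen.contains "critical" then 1 else 0),
         c.2.1 + (if seen.contains "high" then 1 else 0),
         c.2.2.1 + (if seen.contains "medium" then 1 else 0),
         c.2.2.2 + (if seen.contains "low" then 1 else 0)))
      ((0, 0, 0, 0) : Int × Int × Int × Int)
  [("critical", t.1), ("high", t.2.1), ("medium", t.2.2.1), ("low", t.2.2.2)]

-- ===== PRECONDITION & SPEC =====
-- Pre_ excludes (a) assoc lists with duplicate keys at either level — a Python dict cannot
-- contain them, so such lists represent no Python input — and (b) vulnerability records
-- lacking a 'severity' key, on which A raises KeyError except when every any()-scan happens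
-- to short-circuit before the malformed record (there B naturally raises).
def Pre_risk_assessment (vulnerabilities : List (String × List (List (String × String)))) : Prop :=
  (vulnerabilities.map Prod.fst).Nodup ∧
  ∀ kv ∈ vulnerabilities, ∀ v ∈ kv.2, (v.map Prod.fst).Nodup ∧ "severity" ∈ v.map Prod.fst

instance (vulnerabilities : List (String × List (List (String × String)))) : Decidable (Pre_risk_assessment vulnerabilities) := by
  unfold Pre_risk_assessment; infer_instance

def pvWitness_risk_assessment : (List (String × List (List (String × String)))) :=
  [("host1", [[("severity", "critical")], [("severity", "low")]]), ("host2", [])]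

def Spec_risk_assessment (vulnerabilities : List (String × List (List (String × String)))) (out : List (String × Int)) : Prop := out = risk_assessment_alt vulnerabilities
instance (vulnerabilities : List (String × List (List (String × String)))) (out : List (String × Int)) : Decidable (Spec_risk_assessment vulnerabilities out) := by unfold Spec_risk_assessment; infer_instance

-- ===== CLAIM (what is proved, stated in full; the proofs are below) =====
def Claim_equal_risk_assessment : Prop := ∀ (vulnerabilities : List (String × List (List (String × String)))), Dom_risk_assessment vulnerabilities → Pre_risk_assessment vulnerabilities → Spec_risk_assessment vulnerabilities (risk_assessment vulnerabilities)

-- ===== LEMMAS AND PROOFS =====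

-- shifting the accumulator out of A's counting fold
theorem pvCountShift {α : Type} (p : α → Bool) (l : List α) (a : Int) :
    l.foldl (fun acc x => if p x then acc + 1 else acc) a
      = a + l.foldl (fun acc x => if p x then acc + 1 else acc) 0 := by
  induction l generalizing a with
  | nil => simp
  | cons x xs ih =>
    simp only [List.foldl_cons]
    rw [ih, ih (if p x then 0 + 1 else 0)]
    split <;> ring

-- per-host: membership in B's severity set coincides with A's any()-scan
theorem pvHostContains (vulns : List (List (String × String)))
    (h : ∀ v ∈ vulns, "severity" ∈ v.map Prod.fst) (s : String) :
    (pvHostSeen vulns).contains s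
      = vulns.any (fun v => PySem.Dict.get? ⟨v⟩ "severity" == some s) := by
  apply Bool.eq_iff_iff.mpr
  simp only [pvHostSeen, PySem.Set.contains_iff, PySem.Set.mem_ofList, List.mem_map,
    List.any_eq_true, beq_iff_eq]
  constructor
  · rintro ⟨v, hv, rfl⟩
    refine ⟨v, hv, ?_⟩
    have hk := h v hv
    cases hq : PySem.Dict.get? ⟨v⟩ "severity" with
    | none =>
      exact absurd hq (by simpa [PySem.Dict.get?_eq_none_iff_not_mem_keys, PySem.Dict.keys] using hk)
    | some x => simp [PySem.Dict.getD_eq_get?_getD, hq]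
  · rintro ⟨v, hv, hq⟩
    exact ⟨v, hv, by simp [PySem.Dict.getD_eq_get?_getD, hq]⟩

-- the single fold of B computes, componentwise, A's four counts
theorem pvMain (l : List (String × List (List (String × String))))
    (hl : ∀ kv ∈ l, ∀ v ∈ kv.2, "severity" ∈ v.map Prod.fst) (a b c d : Int) :
    l.foldl
      (fun (c : Int × Int × Int × Int) kv =>
        let seen := pvHostSeen kv.2
        (c.1 + (if seen.contains "critical" then 1 else 0),
         c.2.1 + (if seen.contains "high" then 1 else 0),
         c.2.2.1 + (if seen.contains "medium" then 1 else 0),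
         c.2.2.2 + (if seen.contains "low" then 1 else 0))) (a, b, c, d)
      = (a + pvCountA l "critical", b + pvCountA l "high",
         c + pvCountA l "medium", d + pvCountA l "low") := by
  induction l generalizing a b c d with
  | nil => simp [pvCountA]
  | cons kv xs ih =>
    have hkv : ∀ v ∈ kv.2, "severity" ∈ v.map Prod.fst := hl kv (by simp)
    have hxs : ∀ e ∈ xs, ∀ v ∈ e.2, "severity" ∈ v.map Prod.fst :=
      fun e he => hl e (List.mem_cons_of_mem _ he)
    simp only [List.foldl_cons]
    rw [ih hxs]
    have hA : ∀ s : String, pvCountA (kv :: xs) s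
        = (if (pvHostSeen kv.2).contains s then (1:Int) else 0) + pvCountA xs s := by
      intro s
      simp only [pvCountA, List.map_cons, List.foldl_cons]
      rw [pvCountShift, pvHostContains kv.2 hkv s]
      split <;> ring_nf
    rw [hA, hA, hA, hA]
    refine Prod.ext ?_ (Prod.ext ?_ (Prod.ext ?_ ?_)) <;> simp <;> ring

-- ===== VERDICT (by name: the statement is the Claim_ definition above) =====
theorem risk_assessment_spec : Claim_equal_risk_assessment := by
  intro vs _ hpre
  unfold Spec_risk_assessment risk_assessment risk_assessment_alt
  have hl : ∀ kv ∈ vs, ∀ v ∈ kv.2, "severity" ∈ v.map Prod.fst :=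
    fun kv hkv v hv => (hpre.2 kv hkv v hv).2
  rw [pvMain vs hl 0 0 0 0]
  simp
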